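-- pv_equiv track=rewrite | github.com/Lormenyo/daily-Dose-of-Code | other/possibleAnswer.py | find2
-- ===== SOURCE A (Python) =====
-- def find2(words, string):
--     def convertToDic(w):
--         mapW = {}
--         for character in w:
--             mapW[character] = mapW.get(character, 0) + 1
--         return mapW
--     def compare(stringMap, wordMap):
--         for c in wordMap:
--             if wordMap[c] > stringMap.get(c,0):
--                 return False
--         return True
--     stringMap = convertToDic(string)
--
--     for word in words:
--         wordMap = convertToDic(word)
--         if compare(stringMap, wordMap):
--             return word
--     return "-"
-- ===== SOURCE B (Python) =====
-- def find2(words, string):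
--     ss = sorted(string)
--     for word in words:
--         sw = sorted(word)
--         i = 0
--         for ch in ss:
--             if i < len(sw) and sw[i] == ch:
--                 i += 1
--         if i == len(sw):
--             return word
--     return "-"
-- ===== Notes on version B (the rewrite author's own statement) =====
-- stated objective: alternative
-- what changed: Replaces A's character-count dictionaries by sorting: the string is sorted once and each sorted word is checked with a greedy merge scan (subsequence test on the sorted lists), so no counter dict is built or compared.
import Mathlib
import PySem

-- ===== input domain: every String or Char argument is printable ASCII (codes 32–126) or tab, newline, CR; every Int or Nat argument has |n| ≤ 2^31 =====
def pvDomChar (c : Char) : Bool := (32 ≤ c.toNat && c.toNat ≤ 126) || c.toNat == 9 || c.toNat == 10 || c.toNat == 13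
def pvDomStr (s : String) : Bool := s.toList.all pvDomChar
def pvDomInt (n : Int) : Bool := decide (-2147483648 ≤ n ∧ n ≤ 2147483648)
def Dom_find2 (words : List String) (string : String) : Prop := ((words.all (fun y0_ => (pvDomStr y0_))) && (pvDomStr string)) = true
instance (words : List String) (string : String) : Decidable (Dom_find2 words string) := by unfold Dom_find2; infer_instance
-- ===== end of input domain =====

-- B replaces A's character-count dictionaries by sorting: the string is sorted once
-- and each sorted word is checked by a greedy merge scan (a subsequence test on the
-- sorted character lists); no counter dict is built or compared. Similar cost, not claimed faster.
-- ===== PORT A =====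
def pvConvertToDic (w : String) : PySem.Dict Char Int :=
  w.toList.foldl (fun m c => m.insert c (m.getD c 0 + 1)) PySem.Dict.empty

def pvCompare (stringMap wordMap : PySem.Dict Char Int) : Bool :=
  wordMap.keys.all (fun c => !(decide (wordMap.getD c 0 > stringMap.getD c 0)))

def find2Loop (stringMap : PySem.Dict Char Int) : List String → String
  | [] => "-"
  | w :: rest => if pvCompare stringMap (pvConvertToDic w) then w else find2Loop stringMap rest

def find2 (words : List String) (string : String) : String :=
  find2Loop (pvConvertToDic string) words

-- ===== PORT B =====
-- the inner 'for ch in ss' loop: i advances past sw[i] when it matches ch ('i < len(sw) and sw[i] == ch')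
def find2_altFit (sw ss : List Char) : Bool :=
  (ss.foldl (fun i ch => if h : i < sw.length then (if sw[i] == ch then i + 1 else i) else i) 0)
    == sw.length

def find2_altLoop (ss : List Char) : List String → String
  | [] => "-"
  | w :: rest =>
    if find2_altFit (PySem.List.sorted w.toList (fun c => c) false) ss then w
    else find2_altLoop ss rest

def find2_alt (words : List String) (string : String) : String :=
  find2_altLoop (PySem.List.sorted string.toList (fun c => c) false) words

-- ===== PRECONDITION & SPEC =====
def Spec_find2 (words : List String) (string : String) (out : String) : Prop := out = find2_alt words string
instance (words : List String) (string : String) (out : String) : Decidable (Spec_find2 words string out) := by unfold Spec_find2; infer_instance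

-- ===== CLAIM (what is proved, stated in full; the proofs are below) =====
def Claim_equal_find2 : Prop := ∀ (words : List String) (string : String), Dom_find2 words string → Spec_find2 words string (find2 words string)

-- ===== LEMMAS AND PROOFS =====
lemma convert_eq_counter (w : String) : pvConvertToDic w = PySem.Dict.counter w.toList := by
  simpa [pvConvertToDic] using PySem.Dict.foldl_insert_getD_add_one_eq_counter (xs := w.toList)

-- A's compare is exactly the count condition of List.subperm_ext_iff
lemma pvCompare_iff (s w : String) :
    pvCompare (pvConvertToDic s) (pvConvertToDic w) = true
      ↔ ∀ c ∈ w.toList, w.toList.count c ≤ s.toList.count c := by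
  rw [convert_eq_counter, convert_eq_counter, pvCompare]
  simp only [PySem.Dict.keys_counter, PySem.Dict.getD_counter, List.all_eq_true,
    PySem.Set.mem_ofList, Bool.not_eq_eq_eq_not, Bool.not_true, decide_eq_false_iff_not, not_lt]
  exact ⟨fun h c hc => by exact_mod_cast h c hc, fun h c hc => by exact_mod_cast h c hc⟩

-- greedy merge scan = sublist test (of the pending suffix of sw)
lemma greedy_fold (sw : List Char) : ∀ (ss : List Char) (i : Nat), i ≤ sw.length →
    ((ss.foldl (fun i ch => if h : i < sw.length then (if sw[i] == ch then i + 1 else i) else i) i)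
        = sw.length ↔ List.Sublist (sw.drop i) ss) := by
  intro ss
  induction ss with
  | nil =>
    intro i hi
    simp only [List.foldl_nil, List.sublist_nil, List.drop_eq_nil_iff]
    omega
  | cons b bs ih =>
    intro i hi
    rw [List.foldl_cons]
    by_cases h : i < sw.length
    · by_cases he : sw[i] = b
      · simp only [h, dif_pos, he, beq_self_eq_true, if_pos]
        rw [ih (i + 1) h, List.drop_eq_getElem_cons h, he]
        exact (List.cons_sublist_cons).symm
      · have hb : (sw[i] == b) = false := by simpa using he
        simp only [h, dif_pos, hb, Bool.false_eq_true, if_neg, not_false_iff]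
        rw [ih i (le_of_lt h)]
        constructor
        · intro hs
          exact hs.cons b
        · intro hs
          rw [List.drop_eq_getElem_cons h] at hs ⊢
          rcases List.sublist_cons_iff.mp hs with h1 | ⟨r, hr, _⟩
          · exact h1
          · exact absurd (List.cons.injEq .. ▸ hr).1 he
    · have hie : i = sw.length := by omega
      simp only [h, dif_neg, not_false_iff]
      rw [ih i hi, hie, List.drop_length]
      simp

lemma fit_iff (w s : String) :
    find2_altFit (PySem.List.sorted w.toList (fun c => c) false)
        (PySem.List.sorted s.toList (fun c => c) false) = true
      ↔ List.Sublist (PySem.List.sorted w.toList (fun c => c) false) (PySem.List.sorted s.toList (fun c => c) false) := by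
  rw [find2_altFit, beq_iff_eq]
  simpa using greedy_fold (PySem.List.sorted w.toList (fun c => c) false)
    (PySem.List.sorted s.toList (fun c => c) false) 0 (Nat.zero_le _)

lemma sorted_sublist_iff_counts (w s : String) :
    (List.Sublist (PySem.List.sorted w.toList (fun c => c) false) (PySem.List.sorted s.toList (fun c => c) false))
      ↔ ∀ c ∈ w.toList, w.toList.count c ≤ s.toList.count c := by
  have pw := PySem.List.sorted_perm (xs := w.toList) (key := fun c => c) (rev := false)
  have ps := PySem.List.sorted_perm (xs := s.toList) (key := fun c => c) (rev := false)
  constructor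
  · intro hsub c hc
    have : List.Subperm w.toList s.toList :=
      (pw.symm.subperm).trans ((hsub.subperm).trans ps.subperm)
    exact List.subperm_ext_iff.mp this c hc
  · intro h
    have hsp : List.Subperm w.toList s.toList := List.subperm_ext_iff.mpr h
    have hsp' : List.Subperm (PySem.List.sorted w.toList (fun c => c) false) (PySem.List.sorted s.toList (fun c => c) false) :=
      (pw.subperm).trans (hsp.trans ps.symm.subperm)
    exact List.sublist_of_subperm_of_pairwise hsp'
      (PySem.List.sorted_pairwise (xs := w.toList) (key := fun c => c))
      (PySem.List.sorted_pairwise (xs := s.toList) (key := fun c => c))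

lemma branch_eq (s w : String) :
    pvCompare (pvConvertToDic s) (pvConvertToDic w)
      = find2_altFit (PySem.List.sorted w.toList (fun c => c) false)
          (PySem.List.sorted s.toList (fun c => c) false) := by
  rw [Bool.eq_iff_iff, pvCompare_iff, fit_iff]
  exact (sorted_sublist_iff_counts w s).symm

lemma loop_eq (s : String) (ws : List String) :
    find2Loop (pvConvertToDic s) ws
      = find2_altLoop (PySem.List.sorted s.toList (fun c => c) false) ws := by
  induction ws with
  | nil => rfl
  | cons w rest ih => rw [find2Loop, find2_altLoop, branch_eq, ih]

-- ===== VERDICT (by name: the statement is the Claim_ definition above) =====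
theorem find2_spec : Claim_equal_find2 := by
  intro words string _
  unfold Spec_find2 find2 find2_alt
  exact loop_eq string words
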